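-- pv_equiv track=rewrite | github.com/zhenfelix/OnlineJudgeCodings | 塔子哥学算法/百度春招-2023.3.13-第二题-构造回文串.py | solve
-- ===== SOURCE A (Python) =====
-- def solve(n):
--     def check(x):
--         lo, hi = 1, x
--         while lo <= hi:
--             mid = (lo+hi)//2
--             if (mid+1)*mid//2 <= x:
--                 lo = mid + 1
--             else:
--                 hi = mid - 1
--         return hi
--     ans = []
--     while n:
--         t = check(n)
--         ans.append('d'*t)
--         n -= (t+1)*t//2
--         if n <= 3:
--             ans.append('red'[:n])
--             break
--         n -= 2
--         ans.append('re')
--     return ''.join(ans)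
-- ===== SOURCE B (Python) =====
-- def solve(n):
--     if n <= 0:
--         return ''
--     t = 0
--     tri = 0
--     while tri + t + 1 <= n:
--         t += 1
--         tri += t
--     m = n - tri
--     if m <= 3:
--         return 'd' * t + 'red'[:m]
--     return 'd' * t + 're' + solve(m - 2)
-- ===== Notes on version B (the rewrite author's own statement) =====
-- stated objective: simpler
-- what changed: Replaces the binary-search helper and the list-append/join outer loop with a recursive greedy that finds the largest triangular number by a plain additive scan (no multiplication or division) and builds the answer by string concatenation.
-- intended difference: At n = -1 (and only there) A returns 're' -- an artefact of 'red'[:n] slicing with leftover negative loop state -- while B returns '', the value A itself returns for every other non-positive n and the intended answer when no characters are requested. — e.g. on solve(-1): A returns "re", B returns ""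
import Mathlib
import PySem

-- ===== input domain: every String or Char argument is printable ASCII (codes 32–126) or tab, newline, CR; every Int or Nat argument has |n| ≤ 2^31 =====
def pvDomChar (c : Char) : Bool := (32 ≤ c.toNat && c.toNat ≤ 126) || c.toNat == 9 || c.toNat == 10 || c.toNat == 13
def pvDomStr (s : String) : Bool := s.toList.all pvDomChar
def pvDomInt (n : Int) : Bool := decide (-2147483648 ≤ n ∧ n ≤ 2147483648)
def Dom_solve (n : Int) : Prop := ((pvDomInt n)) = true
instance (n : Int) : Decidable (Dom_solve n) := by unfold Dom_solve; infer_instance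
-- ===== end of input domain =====

-- B replaces A's binary-search helper and list-append/join loop by a recursive greedy with a
-- plain additive scan for the largest triangular number (simpler; not claimed faster).
-- (Loops are ported with a Nat fuel that is provably sufficient — a totality guard only.)

-- ===== PORT A =====
-- inner binary search `check(x)`: loop state (lo, hi); fuel ≥ interval length suffices
def checkLoop (fuel : Nat) (x lo hi : Int) : Int :=
  match fuel with
  | 0 => hi
  | f + 1 =>
    if lo ≤ hi then
      if PySem.Int.floordiv ((PySem.Int.floordiv (lo + hi) 2 + 1) * PySem.Int.floordiv (lo + hi) 2) 2 ≤ x then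
        checkLoop f x (PySem.Int.floordiv (lo + hi) 2 + 1) hi
      else
        checkLoop f x lo (PySem.Int.floordiv (lo + hi) 2 - 1)
    else hi

def checkA (x : Int) : Int := checkLoop x.toNat x 1 x

-- 'd' * t  (Python string repetition)
def dstr (t : Int) : String := String.ofList (PySem.List.pyRepeat "d".toList t)

-- outer `while n:` loop of A, carrying the list `ans` (the locals t = check(n) and the
-- decremented n are written out in place of Python's local assignments)
def solveLoop (fuel : Nat) (n : Int) (ans : List String) : List String :=
  match fuel with
  | 0 => ans
  | f + 1 =>
    if n ≠ 0 then
      if n - PySem.Int.floordiv ((checkA n + 1) * checkA n) 2 ≤ 3 then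
        (ans ++ [dstr (checkA n)]) ++
          [PySem.Str.slice "red" none (some (n - PySem.Int.floordiv ((checkA n + 1) * checkA n) 2))]
      else
        solveLoop f (n - PySem.Int.floordiv ((checkA n + 1) * checkA n) 2 - 2)
          ((ans ++ [dstr (checkA n)]) ++ ["re"])
    else ans

def solve (n : Int) : String := PySem.Str.join "" (solveLoop (n.toNat + 1) n [])

-- ===== PORT B =====
-- B's inner additive scan: state (t, tri); fuel ≥ n - tri suffices
def scanB (fuel : Nat) (n t tri : Int) : Int × Int :=
  match fuel with
  | 0 => (t, tri)
  | f + 1 => if tri + t + 1 ≤ n then scanB f n (t + 1) (tri + (t + 1)) else (t, tri)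

-- B's recursion, on the character-list side (Python str concatenation = List.append on
-- code points; B's locals t, tri, m are written out in place of the assignments)
def altGo (fuel : Nat) (n : Int) : List Char :=
  match fuel with
  | 0 => []
  | f + 1 =>
    if n ≤ 0 then []
    else if n - (scanB n.toNat n 0 0).2 ≤ 3 then
      PySem.List.pyRepeat ['d'] (scanB n.toNat n 0 0).1 ++
        PySem.Chars.slice "red".toList none (some (n - (scanB n.toNat n 0 0).2))
    else
      PySem.List.pyRepeat ['d'] (scanB n.toNat n 0 0).1 ++ "re".toList ++
        altGo f (n - (scanB n.toNat n 0 0).2 - 2)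

def solve_alt (n : Int) : String := String.ofList (altGo (n.toNat + 1) n)

-- ===== PRECONDITION & SPEC =====
-- At n = -1 (and only there) A returns 're' — an artefact of 'red'[:n] slicing with leftover
-- negative loop state — while B returns '', the value A itself returns for every other
-- non-positive n and the intended answer when no characters are requested.
def D_solve (n : Int) : Prop := n = -1
instance (n : Int) : Decidable (D_solve n) := by unfold D_solve; infer_instance
def Spec_solve (n : Int) (out : String) : Prop := ¬ D_solve n → out = solve_alt n
instance (n : Int) (out : String) : Decidable (Spec_solve n out) := by unfold Spec_solve; infer_instance
def pvDiffWitness_solve : Int := (-1)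
def pvDiffWitnessOut_solve : String × String := ("re", "")

-- ===== CLAIM (what is proved, stated in full; the proofs are below) =====
def Claim_unchanged_solve : Prop := ∀ (n : Int), Dom_solve n → Spec_solve n (solve n)
def Claim_changed_solve : Prop := Dom_solve (pvDiffWitness_solve) ∧ D_solve (pvDiffWitness_solve) ∧ solve (pvDiffWitness_solve) = pvDiffWitnessOut_solve.1 ∧ solve_alt (pvDiffWitness_solve) = pvDiffWitnessOut_solve.2 ∧ pvDiffWitnessOut_solve.1 ≠ pvDiffWitnessOut_solve.2
def Claim_exact_solve : Prop := ∀ (n : Int), Dom_solve n → D_solve n → solve n ≠ solve_alt n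

-- ===== LEMMAS AND PROOFS =====

-- step/stop shapes of the fueled loops
theorem checkLoop_step (f : Nat) (x lo hi : Int) (h : lo ≤ hi) :
    checkLoop (f + 1) x lo hi =
      if PySem.Int.floordiv ((PySem.Int.floordiv (lo + hi) 2 + 1) * PySem.Int.floordiv (lo + hi) 2) 2 ≤ x
      then checkLoop f x (PySem.Int.floordiv (lo + hi) 2 + 1) hi
      else checkLoop f x lo (PySem.Int.floordiv (lo + hi) 2 - 1) := by
  simp only [checkLoop, if_pos h]

theorem checkLoop_stop (f : Nat) (x lo hi : Int) (h : ¬ lo ≤ hi) : checkLoop f x lo hi = hi := by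
  cases f <;> simp only [checkLoop, if_neg h]

theorem solveLoop_zero (f : Nat) (ans : List String) : solveLoop (f + 1) 0 ans = ans := by
  simp only [solveLoop]
  rw [if_neg (by omega)]

theorem solveLoop_break (f : Nat) (n : Int) (ans : List String) (h : n ≠ 0)
    (h2 : n - PySem.Int.floordiv ((checkA n + 1) * checkA n) 2 ≤ 3) :
    solveLoop (f + 1) n ans = (ans ++ [dstr (checkA n)]) ++
      [PySem.Str.slice "red" none (some (n - PySem.Int.floordiv ((checkA n + 1) * checkA n) 2))] := by
  simp only [solveLoop]
  rw [if_pos h, if_pos h2]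

theorem solveLoop_cont (f : Nat) (n : Int) (ans : List String) (h : n ≠ 0)
    (h2 : ¬ n - PySem.Int.floordiv ((checkA n + 1) * checkA n) 2 ≤ 3) :
    solveLoop (f + 1) n ans = solveLoop f (n - PySem.Int.floordiv ((checkA n + 1) * checkA n) 2 - 2)
      ((ans ++ [dstr (checkA n)]) ++ ["re"]) := by
  simp only [solveLoop]
  rw [if_pos h, if_neg h2]

theorem altGo_zero (f : Nat) (n : Int) (h : n ≤ 0) : altGo f n = [] := by
  cases f with
  | zero => simp only [altGo]
  | succ f => simp only [altGo]; rw [if_pos h]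

theorem altGo_break (f : Nat) (n : Int) (h : ¬ n ≤ 0) (h2 : n - (scanB n.toNat n 0 0).2 ≤ 3) :
    altGo (f + 1) n = PySem.List.pyRepeat ['d'] (scanB n.toNat n 0 0).1 ++
      PySem.Chars.slice "red".toList none (some (n - (scanB n.toNat n 0 0).2)) := by
  simp only [altGo]
  rw [if_neg h, if_pos h2]

theorem altGo_cont (f : Nat) (n : Int) (h : ¬ n ≤ 0) (h2 : ¬ n - (scanB n.toNat n 0 0).2 ≤ 3) :
    altGo (f + 1) n = PySem.List.pyRepeat ['d'] (scanB n.toNat n 0 0).1 ++ "re".toList ++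
      altGo f (n - (scanB n.toNat n 0 0).2 - 2) := by
  simp only [altGo]
  rw [if_neg h, if_neg h2]

-- `''.join(l)` with empty separator is the flattening of l (char level)
theorem join_empty_flatten (l : List (List Char)) :
    PySem.Chars.join [] l = l.flatten := by
  induction l with
  | nil => simp [PySem.Chars.join, List.intercalate]
  | cons a l ih =>
    cases l with
    | nil => simp [PySem.Chars.join, List.intercalate]
    | cons b r =>
      rw [PySem.Chars.join_cons_cons]
      simp only [List.flatten_cons]
      rw [ih]
      simp

-- the joined characters of the accumulator list
def accChars (l : List String) : List Char := (l.map String.toList).flatten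

theorem accChars_append (l : List String) (s : String) :
    accChars (l ++ [s]) = accChars l ++ s.toList := by
  simp [accChars]

-- invariant of B's scan: result (t, tri) with tri the t-th triangular number, t maximal
theorem scanB_spec : ∀ (fuel : Nat) (n t tri : Int), (n - tri).toNat ≤ fuel → 0 ≤ t →
    2 * tri = t * (t + 1) → t * (t + 1) ≤ 2 * n →
    0 ≤ (scanB fuel n t tri).1 ∧
      2 * (scanB fuel n t tri).2 = (scanB fuel n t tri).1 * ((scanB fuel n t tri).1 + 1) ∧
      (scanB fuel n t tri).1 * ((scanB fuel n t tri).1 + 1) ≤ 2 * n ∧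
      2 * n < ((scanB fuel n t tri).1 + 1) * ((scanB fuel n t tri).1 + 2) := by
  intro fuel
  induction fuel with
  | zero =>
    intro n t tri hf ht htri hle
    have hnt : n ≤ tri := by omega
    simp only [scanB]
    exact ⟨ht, htri, hle, by nlinarith⟩
  | succ f ih =>
    intro n t tri hf ht htri hle
    simp only [scanB]
    by_cases hg : tri + t + 1 ≤ n
    · rw [if_pos hg]
      exact ih n (t + 1) (tri + (t + 1)) (by omega) (by omega) (by nlinarith) (by nlinarith)
    · rw [if_neg hg]
      exact ⟨ht, htri, hle, by nlinarith⟩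

-- invariant of A's binary search: result h satisfies lo-1 ≤ h, h(h+1) ≤ 2x < (h+1)(h+2)
theorem checkLoop_spec : ∀ (fuel : Nat) (x lo hi : Int), (hi + 1 - lo).toNat ≤ fuel →
    lo ≤ hi + 1 → (lo - 1) * lo ≤ 2 * x → 2 * x < (hi + 1) * (hi + 2) →
    lo - 1 ≤ checkLoop fuel x lo hi ∧
      checkLoop fuel x lo hi * (checkLoop fuel x lo hi + 1) ≤ 2 * x ∧
      2 * x < (checkLoop fuel x lo hi + 1) * (checkLoop fuel x lo hi + 2) := by
  intro fuel
  induction fuel with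
  | zero =>
    intro x lo hi hf h2 hA hB
    have hhi : hi = lo - 1 := by omega
    subst hhi
    simp only [checkLoop]
    refine ⟨by omega, ?_, hB⟩
    have he : (lo - 1) * (lo - 1 + 1) = (lo - 1) * lo := by ring
    linarith
  | succ f ih =>
    intro x lo hi hf h2 hA hB
    by_cases hle : lo ≤ hi
    · have hb := PySem.Int.floordiv_two_mid_bounds hle
      rw [checkLoop_step f x lo hi hle]
      by_cases hc : PySem.Int.floordiv ((PySem.Int.floordiv (lo + hi) 2 + 1) * PySem.Int.floordiv (lo + hi) 2) 2 ≤ x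
      · rw [if_pos hc]
        have h1 : ¬ (x + 1 ≤ PySem.Int.floordiv ((PySem.Int.floordiv (lo + hi) 2 + 1) * PySem.Int.floordiv (lo + hi) 2) 2) := by
          omega
        rw [PySem.Int.le_floordiv_iff_mul_le (by omega : (0:Int) < 2)] at h1
        obtain ⟨c, hc'⟩ := Int.even_mul_succ_self (PySem.Int.floordiv (lo + hi) 2)
        have hq : (PySem.Int.floordiv (lo + hi) 2 + 1) * PySem.Int.floordiv (lo + hi) 2 = c + c := by
          rw [show (PySem.Int.floordiv (lo + hi) 2 + 1) * PySem.Int.floordiv (lo + hi) 2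
                = PySem.Int.floordiv (lo + hi) 2 * (PySem.Int.floordiv (lo + hi) 2 + 1) from by ring, hc']
        have hcc : c + c ≤ 2 * x := by omega
        have hA' : (PySem.Int.floordiv (lo + hi) 2 + 1 - 1) * (PySem.Int.floordiv (lo + hi) 2 + 1) ≤ 2 * x := by
          have he : (PySem.Int.floordiv (lo + hi) 2 + 1 - 1) * (PySem.Int.floordiv (lo + hi) 2 + 1)
              = PySem.Int.floordiv (lo + hi) 2 * (PySem.Int.floordiv (lo + hi) 2 + 1) := by ring
          rw [he, hc']
          omega
        have h := ih x (PySem.Int.floordiv (lo + hi) 2 + 1) hi (by omega) (by omega) hA' hB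
        exact ⟨by omega, h.2.1, h.2.2⟩
      · rw [if_neg hc]
        have h1 : x + 1 ≤ PySem.Int.floordiv ((PySem.Int.floordiv (lo + hi) 2 + 1) * PySem.Int.floordiv (lo + hi) 2) 2 := by
          omega
        rw [PySem.Int.le_floordiv_iff_mul_le (by omega : (0:Int) < 2)] at h1
        have hB' : 2 * x < (PySem.Int.floordiv (lo + hi) 2 - 1 + 1) * (PySem.Int.floordiv (lo + hi) 2 - 1 + 2) := by
          have he : (PySem.Int.floordiv (lo + hi) 2 - 1 + 1) * (PySem.Int.floordiv (lo + hi) 2 - 1 + 2)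
              = (PySem.Int.floordiv (lo + hi) 2 + 1) * PySem.Int.floordiv (lo + hi) 2 := by ring
          linarith
        exact ih x lo (PySem.Int.floordiv (lo + hi) 2 - 1) (by omega) (by omega) hA hB'
    · rw [checkLoop_stop (f + 1) x lo hi hle]
      have hhi : hi = lo - 1 := by omega
      subst hhi
      refine ⟨by omega, ?_, hB⟩
      have he : (lo - 1) * (lo - 1 + 1) = (lo - 1) * lo := by ring
      linarith

-- the greedy t is unique
theorem tri_unique (x h g : Int) (hh0 : 0 ≤ h) (hg0 : 0 ≤ g)
    (h1 : h * (h + 1) ≤ 2 * x) (h2 : 2 * x < (h + 1) * (h + 2))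
    (g1 : g * (g + 1) ≤ 2 * x) (g2 : 2 * x < (g + 1) * (g + 2)) : h = g := by
  rcases lt_trichotomy h g with hlt | he | hgt
  · exfalso; nlinarith
  · exact he
  · exfalso; nlinarith

-- for n ≥ 1 the two inner searches agree, and A's (t+1)*t//2 equals B's tri
theorem check_eq_scan (n : Int) (hn : 1 ≤ n) :
    checkA n = (scanB n.toNat n 0 0).1 ∧
      PySem.Int.floordiv ((checkA n + 1) * checkA n) 2 = (scanB n.toNat n 0 0).2 := by
  have hA := checkLoop_spec n.toNat n 1 n (by omega) (by omega) (by nlinarith) (by nlinarith)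
  have hB := scanB_spec n.toNat n 0 0 (by omega) (by omega) (by ring) (by omega)
  have heq : checkA n = (scanB n.toNat n 0 0).1 :=
    tri_unique n (checkA n) (scanB n.toNat n 0 0).1 (by have := hA.1; unfold checkA at *; omega)
      hB.1 hA.2.1 hA.2.2 hB.2.2.1 hB.2.2.2
  refine ⟨heq, ?_⟩
  rw [heq]
  rw [PySem.Int.floordiv_eq_iff_of_pos (by omega : (0:Int) < 2)]
  constructor
  · nlinarith [hB.2.1]
  · nlinarith [hB.2.1]

-- A's check on a non-positive argument returns its argument
theorem checkA_nonpos (n : Int) (hn : n ≤ 0) : checkA n = n := by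
  unfold checkA
  exact checkLoop_stop n.toNat n 1 n (by omega)

-- 'd' * t for negative t is empty
theorem dstr_neg (t : Int) (ht : t < 0) : dstr t = "" := by
  unfold dstr
  rw [show PySem.List.pyRepeat "d".toList t = List.replicate t.toNat 'd' from
        PySem.List.pyRepeat_singleton 'd' t]
  rw [Int.toNat_of_nonpos (by omega : t ≤ 0)]
  rfl

-- 'red'[:m] for m ≤ -3 is empty (char level)
theorem slice_red_neg (m : Int) (hm : m ≤ -3) :
    PySem.Chars.slice "red".toList none (some m) = [] := by
  obtain ⟨k, hk3, hk⟩ : ∃ k : Nat, 3 ≤ k ∧ m = -(k : Int) := ⟨(-m).toNat, by omega, by omega⟩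
  subst hk
  rw [PySem.Chars.slice, PySem.List.slice_to_neg_natCast "red".toList k (by omega)]
  rw [show ("red".toList).length = 3 from rfl, Nat.sub_eq_zero_of_le hk3, List.take_zero]

-- A's one negative iteration: for n ≤ -2 the loop body appends only empty strings and stops
theorem solveLoop_neg (f : Nat) (n : Int) (hn : n ≤ -2) (ans : List String) :
    accChars (solveLoop (f + 1) n ans) = accChars ans := by
  have ht : checkA n = n := checkA_nonpos n (by omega)
  obtain ⟨c, hc⟩ := Int.even_mul_succ_self n
  have hfd : PySem.Int.floordiv ((checkA n + 1) * checkA n) 2 = c := by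
    rw [ht, PySem.Int.floordiv_eq_iff_of_pos (by omega : (0:Int) < 2)]
    constructor <;> nlinarith
  have hcge : 1 ≤ c := by nlinarith
  rw [solveLoop_break f n ans (by omega) (by omega)]
  rw [accChars_append, accChars_append]
  rw [hfd, ht, dstr_neg n (by omega)]
  have hs : (PySem.Str.slice "red" none (some (n - c))).toList = [] := by
    rw [PySem.Str.slice, String.toList_ofList]
    exact slice_red_neg (n - c) (by omega)
  rw [hs]
  simp

-- enough fuel makes altGo's value independent of the fuel
theorem altGo_fuel : ∀ (f1 f2 : Nat) (n : Int), n.toNat < f1 → n.toNat < f2 →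
    altGo f1 n = altGo f2 n := by
  intro f1
  induction f1 with
  | zero => intro f2 n h1 _; omega
  | succ f ih =>
    intro f2 n h1 h2
    rcases le_or_gt n 0 with hn0 | hpos
    · rw [altGo_zero (f + 1) n hn0, altGo_zero f2 n hn0]
    · obtain ⟨g, rfl⟩ : ∃ g, f2 = g + 1 := ⟨f2 - 1, by omega⟩
      have hB := scanB_spec n.toNat n 0 0 (by omega) (by omega) (by ring) (by omega)
      have htri0 : 0 ≤ (scanB n.toNat n 0 0).2 := by nlinarith [hB.1, hB.2.1]
      by_cases hm : n - (scanB n.toNat n 0 0).2 ≤ 3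
      · rw [altGo_break (f) n (by omega) hm, altGo_break g n (by omega) hm]
      · rw [altGo_cont (f) n (by omega) hm, altGo_cont g n (by omega) hm]
        rw [ih g (n - (scanB n.toNat n 0 0).2 - 2) (by omega) (by omega)]

-- main loop correspondence for n ≠ -1
theorem loop_main : ∀ (fuel : Nat) (n : Int), n.toNat < fuel → n ≠ -1 → ∀ ans : List String,
    accChars (solveLoop fuel n ans) = accChars ans ++ altGo (n.toNat + 1) n := by
  intro fuel
  induction fuel with
  | zero => intro n h1 _; omega
  | succ f ih =>
    intro n hk hne ans
    rcases le_or_gt n 0 with hn0 | hpos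
    · rcases eq_or_ne n 0 with he | hne0
      · subst he
        rw [solveLoop_zero f ans, altGo_zero _ 0 (by omega)]
        simp
      · have hn2 : n ≤ -2 := by omega
        rw [altGo_zero _ n (by omega), solveLoop_neg f n hn2 ans]
        simp
    · -- n ≥ 1
      have hcs := check_eq_scan n (by omega)
      have hB := scanB_spec n.toNat n 0 0 (by omega) (by omega) (by ring) (by omega)
      have htri0 : 0 ≤ (scanB n.toNat n 0 0).2 := by nlinarith [hB.1, hB.2.1]
      have htrin : (scanB n.toNat n 0 0).2 ≤ n := by nlinarith [hB.1, hB.2.1, hB.2.2.1]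
      have hdchars : (dstr (checkA n)).toList = PySem.List.pyRepeat ['d'] (scanB n.toNat n 0 0).1 := by
        unfold dstr
        rw [String.toList_ofList, hcs.1]
        rfl
      have hfuel : n.toNat + 1 = (n.toNat - 1) + 1 + 1 := by omega
      by_cases hm : n - (scanB n.toNat n 0 0).2 ≤ 3
      · rw [solveLoop_break f n ans (by omega) (by rw [hcs.2]; omega)]
        rw [hfuel, altGo_break ((n.toNat - 1) + 1) n (by omega) hm]
        rw [accChars_append, accChars_append, hdchars, hcs.2]
        rw [PySem.Str.slice, String.toList_ofList]
        simp
      · rw [solveLoop_cont f n ans (by omega) (by rw [hcs.2]; omega)]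
        rw [hfuel, altGo_cont ((n.toNat - 1) + 1) n (by omega) hm]
        rw [hcs.2]
        rw [ih (n - (scanB n.toNat n 0 0).2 - 2) (by omega)  (by omega)]
        rw [accChars_append, accChars_append, hdchars]
        rw [altGo_fuel ((n - (scanB n.toNat n 0 0).2 - 2).toNat + 1) ((n.toNat - 1) + 1)
              (n - (scanB n.toNat n 0 0).2 - 2) (by omega) (by omega)]
        simp [show ("re" : String).toList = ['r', 'e'] from rfl]

-- package: string-level equality for n ≠ -1
theorem solve_eq_alt (n : Int) (hne : n ≠ -1) : solve n = solve_alt n := by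
  unfold solve solve_alt
  rw [PySem.Str.join]
  rw [show ("" : String).toList = ([] : List Char) from rfl]
  rw [join_empty_flatten]
  have h := loop_main (n.toNat + 1) n (by omega) hne []
  simp only [accChars, List.map_nil, List.flatten_nil, List.nil_append] at h
  rw [h]

-- ===== VERDICT (by name: the statement is the Claim_ definition above) =====
theorem solve_spec : Claim_unchanged_solve := by
  intro n _ hD
  exact solve_eq_alt n hD

theorem solve_changed : Claim_changed_solve := by
  unfold Claim_changed_solve
  refine ⟨by decide, by decide, by decide, by decide, by decide⟩

theorem solve_tight : Claim_exact_solve := by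
  intro n _ hD
  subst hD
  intro hc
  have h1 : solve (-1) = "re" := by decide
  have h2 : solve_alt (-1) = "" := by decide
  rw [h1, h2] at hc
  exact absurd hc (by decide)
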